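-- pv_equiv track=rewrite | github.com/pavlinpetkov420/SoftUni_Python_Web_Developer_Path | Python Advanced - January 2021/Exercises/03_multidimensional_lists/02_2x2_squares_in_matrix.py | check_equal_chars
-- ===== SOURCE A (Python) =====
-- def check_equal_chars(matrix, row_index, col_index, sub_matrix_size):
--     subm = []
--     for ri in range(row_index, row_index + sub_matrix_size):
--         for ci in range(col_index, col_index + sub_matrix_size):
--             subm.append(matrix[ri][ci])
--
--     set_len = len(set(subm))
--     if set_len == 1:
--         return 1
--     else:
--         return 0
-- ===== SOURCE B (Python) =====
-- def check_equal_chars(matrix, row_index, col_index, sub_matrix_size):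
--     if sub_matrix_size <= 0:
--         return 0
--     first = matrix[row_index][col_index]
--     for ri in range(row_index, row_index + sub_matrix_size):
--         row = matrix[ri]
--         for ci in range(col_index, col_index + sub_matrix_size):
--             if row[ci] != first:
--                 return 0
--     return 1
-- ===== Notes on version B (the rewrite author's own statement) =====
-- stated objective: simpler
-- what changed: Instead of materialising every window cell into a list and deduplicating it with set(), B takes the top-left cell as reference and scans the window once, returning 0 on the first mismatch (and 0 immediately for a non-positive window size).
import Mathlib
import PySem

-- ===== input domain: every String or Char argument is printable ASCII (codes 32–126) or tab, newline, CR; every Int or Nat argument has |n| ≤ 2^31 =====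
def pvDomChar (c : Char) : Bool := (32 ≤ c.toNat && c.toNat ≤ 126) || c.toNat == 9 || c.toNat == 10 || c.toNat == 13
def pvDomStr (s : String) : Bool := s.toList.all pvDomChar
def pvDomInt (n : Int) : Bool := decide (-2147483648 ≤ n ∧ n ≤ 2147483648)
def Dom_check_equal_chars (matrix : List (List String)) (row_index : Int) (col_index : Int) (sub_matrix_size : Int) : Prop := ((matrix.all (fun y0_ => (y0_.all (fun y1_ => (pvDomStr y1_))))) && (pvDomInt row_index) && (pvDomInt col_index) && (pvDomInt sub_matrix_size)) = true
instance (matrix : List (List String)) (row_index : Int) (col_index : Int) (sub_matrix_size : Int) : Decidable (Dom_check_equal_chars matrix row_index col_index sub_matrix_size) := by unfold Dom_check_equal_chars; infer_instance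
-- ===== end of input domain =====

-- B replaces A's collect-all-cells-then-dedup-with-set with a single short-circuit scan
-- comparing every window cell to the top-left reference cell (simpler, O(1) extra space).

-- ===== PORT A =====
def check_equal_chars (matrix : List (List String)) (row_index : Int) (col_index : Int) (sub_matrix_size : Int) : Int :=
  let subm :=
    (PySem.List.pyRange row_index (row_index + sub_matrix_size) 1).foldl
      (fun acc ri =>
        (PySem.List.pyRange col_index (col_index + sub_matrix_size) 1).foldl
          (fun acc2 ci =>
            acc2 ++ [PySem.List.pyGetD (PySem.List.pyGetD matrix ri []) ci ""]) acc)
      []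
  let set_len := (PySem.Set.ofList subm).length
  if set_len = 1 then 1 else 0

-- ===== PORT B =====
def check_equal_chars_alt (matrix : List (List String)) (row_index : Int) (col_index : Int) (sub_matrix_size : Int) : Int :=
  if sub_matrix_size ≤ 0 then 0
  else
    let first := PySem.List.pyGetD (PySem.List.pyGetD matrix row_index []) col_index ""
    if (PySem.List.pyRange row_index (row_index + sub_matrix_size) 1).all (fun ri =>
         let row := PySem.List.pyGetD matrix ri []
         (PySem.List.pyRange col_index (col_index + sub_matrix_size) 1).all (fun ci =>
           PySem.List.pyGetD row ci "" == first))
    then 1 else 0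

-- ===== PRECONDITION & SPEC =====
-- Pre_ excludes exactly the inputs on which Python A raises IndexError: some visited
-- row index or column index falls outside the (Python, negative-wrapping) valid range.
def Pre_check_equal_chars (matrix : List (List String)) (row_index : Int) (col_index : Int) (sub_matrix_size : Int) : Prop :=
  sub_matrix_size ≤ 0 ∨
  (-(matrix.length : Int) ≤ row_index ∧ row_index + sub_matrix_size ≤ (matrix.length : Int) ∧
   ∀ ri ∈ PySem.List.pyRange row_index (row_index + sub_matrix_size) 1,
     -((PySem.List.pyGetD matrix ri []).length : Int) ≤ col_index ∧
     col_index + sub_matrix_size ≤ ((PySem.List.pyGetD matrix ri []).length : Int))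
instance (matrix : List (List String)) (row_index : Int) (col_index : Int) (sub_matrix_size : Int) : Decidable (Pre_check_equal_chars matrix row_index col_index sub_matrix_size) := by unfold Pre_check_equal_chars; infer_instance

def pvWitness_check_equal_chars : List (List String) × Int × Int × Int :=
  ([["a", "a", "b"], ["a", "a", "c"]], 0, 0, 2)

def Spec_check_equal_chars (matrix : List (List String)) (row_index : Int) (col_index : Int) (sub_matrix_size : Int) (out : Int) : Prop := out = check_equal_chars_alt matrix row_index col_index sub_matrix_size
instance (matrix : List (List String)) (row_index : Int) (col_index : Int) (sub_matrix_size : Int) (out : Int) : Decidable (Spec_check_equal_chars matrix row_index col_index sub_matrix_size out) := by unfold Spec_check_equal_chars; infer_instance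

-- ===== CLAIM (what is proved, stated in full; the proofs are below) =====
def Claim_equal_check_equal_chars : Prop := ∀ (matrix : List (List String)) (row_index : Int) (col_index : Int) (sub_matrix_size : Int), Dom_check_equal_chars matrix row_index col_index sub_matrix_size → Pre_check_equal_chars matrix row_index col_index sub_matrix_size → Spec_check_equal_chars matrix row_index col_index sub_matrix_size (check_equal_chars matrix row_index col_index sub_matrix_size)

-- ===== LEMMAS AND PROOFS =====

theorem foldl_step_flat {α β : Type} (F : List β → α → List β) (g : α → List β)
    (h : ∀ acc x, F acc x = acc ++ g x) :
    ∀ (l : List α) (acc : List β), l.foldl F acc = acc ++ l.flatMap g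
  | [], acc => by simp
  | x :: l, acc => by
      simp [List.foldl_cons, h acc x, foldl_step_flat F g h l, List.flatMap_cons,
        List.append_assoc]

-- a nodup list whose members are exactly one value has length 1
theorem len_ofList_eq_one_iff {α : Type} [DecidableEq α] (xs : List α) :
    (PySem.Set.ofList xs).length = 1 ↔ ∃ a, a ∈ xs ∧ ∀ x ∈ xs, x = a := by
  constructor
  · intro h
    rcases List.length_eq_one_iff.mp h with ⟨a, ha⟩
    refine ⟨a, ?_, ?_⟩
    · have : a ∈ PySem.Set.ofList xs := by simp [ha]
      simpa [PySem.Set.mem_ofList] using this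
    · intro x hx
      have : x ∈ PySem.Set.ofList xs := by simpa [PySem.Set.mem_ofList] using hx
      simpa [ha] using this
  · rintro ⟨a, haMem, hAll⟩
    have hnd := PySem.Set.nodup_ofList (xs := xs)
    have hmem : ∀ x, x ∈ PySem.Set.ofList xs ↔ x ∈ xs := fun x => PySem.Set.mem_ofList xs x
    cases hs : PySem.Set.ofList xs with
    | nil =>
        exact absurd ((hmem a).mpr haMem) (by simp [hs])
    | cons b t =>
        have hb : b = a := hAll b ((hmem b).mp (by simp [hs]))
        have ht : t = [] := by
          cases t with
          | nil => rfl
          | cons c u =>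
              have hc : c = a := hAll c ((hmem c).mp (by simp [hs]))
              have : b ∉ (c :: u) := by
                rw [hs] at hnd; exact (List.nodup_cons.mp hnd).1
              exact absurd (by simp [hb, hc]) this
        simp [ht]

theorem check_equal_chars_eq_alt (matrix : List (List String)) (r c k : Int) :
    check_equal_chars matrix r c k = check_equal_chars_alt matrix r c k := by
  by_cases hk : k ≤ 0
  · have hR : PySem.List.pyRange r (r + k) 1 = [] :=
      PySem.List.pyRange_one_eq_nil (by omega)
    simp [check_equal_chars, check_equal_chars_alt, hR, hk, PySem.Set.ofList]
  · have hk' : (0 : Int) < k := by omega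
    set f : Int → Int → String :=
      fun ri ci => PySem.List.pyGetD (PySem.List.pyGetD matrix ri []) ci "" with hf
    set R := PySem.List.pyRange r (r + k) 1 with hRdef
    set C := PySem.List.pyRange c (c + k) 1 with hCdef
    have hrR : r ∈ R := by
      rw [hRdef, PySem.List.mem_pyRange_one]; omega
    have hcC : c ∈ C := by
      rw [hCdef, PySem.List.mem_pyRange_one]; omega
    have hsubm :
        R.foldl (fun acc ri => C.foldl (fun acc2 ci => acc2 ++ [f ri ci]) acc) []
          = R.flatMap (fun ri => C.map (f ri)) := by
      simpa using foldl_step_flat _ (fun ri => C.map (f ri))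
        (fun acc ri => PySem.List.foldl_append_singleton_eq_map ..) R []
    have hmemflat : ∀ x, x ∈ R.flatMap (fun ri => C.map (f ri)) ↔
        ∃ ri ∈ R, ∃ ci ∈ C, f ri ci = x := by
      intro x
      simp [List.mem_flatMap, List.mem_map]
    have hA1 : (PySem.Set.ofList (R.flatMap (fun ri => C.map (f ri)))).length = 1 ↔
        ∀ ri ∈ R, ∀ ci ∈ C, f ri ci = f r c := by
      rw [len_ofList_eq_one_iff]
      constructor
      · rintro ⟨a, _, hAll⟩ ri hri ci hci
        have h1 : f ri ci = a := hAll _ ((hmemflat _).mpr ⟨ri, hri, ci, hci, rfl⟩)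
        have h2 : f r c = a := hAll _ ((hmemflat _).mpr ⟨r, hrR, c, hcC, rfl⟩)
        rw [h1, h2]
      · intro hAll
        refine ⟨f r c, (hmemflat _).mpr ⟨r, hrR, c, hcC, rfl⟩, ?_⟩
        intro x hx
        rcases (hmemflat x).mp hx with ⟨ri, hri, ci, hci, hx'⟩
        rw [← hx']; exact hAll ri hri ci hci
    have hB1 : (R.all (fun ri => C.all (fun ci => f ri ci == f r c)) = true) ↔
        ∀ ri ∈ R, ∀ ci ∈ C, f ri ci = f r c := by
      simp [List.all_eq_true]
    show (if (PySem.Set.ofList (R.foldl (fun acc ri => C.foldl (fun acc2 ci => acc2 ++ [f ri ci]) acc) [])).length = 1 then (1:Int) else 0)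
        = check_equal_chars_alt matrix r c k
    rw [hsubm]
    unfold check_equal_chars_alt
    rw [if_neg hk]
    simp only [← hRdef, ← hCdef]
    by_cases hall : ∀ ri ∈ R, ∀ ci ∈ C, f ri ci = f r c
    · rw [if_pos (hA1.mpr hall), if_pos (hB1.mpr hall)]
    · rw [if_neg (fun h => hall (hA1.mp h)), if_neg (fun h => hall (hB1.mp h))]

-- ===== VERDICT (by name: the statement is the Claim_ definition above) =====
theorem check_equal_chars_spec : Claim_equal_check_equal_chars := by
  intro matrix r c k _ _
  unfold Spec_check_equal_chars
  exact check_equal_chars_eq_alt matrix r c k
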